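-- pv_equiv track=rewrite | github.com/mostainRifat/OOPxBasicPythonP | 4. 02 good sequence.py | removedElement
-- ===== SOURCE A (Python) =====
-- def removedElement(n, a):
--     total = 0
--     processed = set()
--
--     for num in a:
--
--         if num <= n and num not in processed:
--             #print (a.count(num))
--             if a.count(num) > num :
--                 total += a.count(num) - num
--                 processed.add(num)
--
--             elif a.count(num) != num:
--                 total += 1
--
--     return total
-- ===== SOURCE B (Python) =====
-- def removedElement(n, a):
--     counts = {}
--     for x in a:
--         counts[x] = counts.get(x, 0) + 1
--     total = 0
--     for v, c in counts.items():
--         if v <= n: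
--             if c > v:
--                 total += c - v
--             elif c < v:
--                 total += c
--     return total
-- ===== Notes on version B (the rewrite author's own statement) =====
-- stated objective: faster
-- what changed: B builds a frequency dictionary in one pass and sums each distinct value's adjustment once (adding the whole count c when c < v, matching A's per-occurrence +1), instead of A's loop that rescans the list with a.count on every element.
import Mathlib
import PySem

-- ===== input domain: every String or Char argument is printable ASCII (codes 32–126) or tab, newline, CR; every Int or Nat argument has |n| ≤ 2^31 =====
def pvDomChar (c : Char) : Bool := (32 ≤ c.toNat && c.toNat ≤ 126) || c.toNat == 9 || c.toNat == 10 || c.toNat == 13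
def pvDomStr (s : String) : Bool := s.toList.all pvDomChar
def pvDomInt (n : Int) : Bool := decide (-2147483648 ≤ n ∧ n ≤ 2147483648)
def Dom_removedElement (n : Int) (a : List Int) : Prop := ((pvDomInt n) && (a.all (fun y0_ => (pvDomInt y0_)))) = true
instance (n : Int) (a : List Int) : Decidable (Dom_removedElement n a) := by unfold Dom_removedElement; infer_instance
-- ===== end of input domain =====

-- B replaces A's quadratic per-element a.count rescans with a one-pass frequency
-- dictionary summed once per distinct value (objective: faster).


-- ===== PORT A =====
def removedElement (n : Int) (a : List Int) : Int :=
  (a.foldl (fun (st : Int × PySem.Set Int) num =>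
      if num ≤ n ∧ ¬ PySem.Set.contains st.2 num then
        if (a.count num : Int) > num then
          (st.1 + ((a.count num : Int) - num), PySem.Set.add st.2 num)
        else if (a.count num : Int) ≠ num then
          (st.1 + 1, st.2)
        else st
      else st)
    ((0 : Int), PySem.Set.empty)).1

-- ===== PORT B =====
def removedElement_alt (n : Int) (a : List Int) : Int :=
  let counts : PySem.Dict Int Int :=
    a.foldl (fun d x => d.insert x (d.getD x 0 + 1)) PySem.Dict.empty
  counts.items.foldl (fun (total : Int) vc =>
      if vc.1 ≤ n then
        if vc.2 > vc.1 then total + (vc.2 - vc.1)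
        else if vc.2 < vc.1 then total + vc.2
        else total
      else total) 0

-- ===== PRECONDITION & SPEC =====
def Spec_removedElement (n : Int) (a : List Int) (out : Int) : Prop := out = removedElement_alt n a
instance (n : Int) (a : List Int) (out : Int) : Decidable (Spec_removedElement n a out) := by unfold Spec_removedElement; infer_instance

-- ===== CLAIM (what is proved, stated in full; the proofs are below) =====
def Claim_equal_removedElement : Prop := ∀ (n : Int) (a : List Int), Dom_removedElement n a → Spec_removedElement n a (removedElement n a)

-- ===== LEMMAS AND PROOFS =====
-- proof-only helpers
def pvStepA (n : Int) (a : List Int) (st : Int × PySem.Set Int) (num : Int) :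
    Int × PySem.Set Int :=
  if num ≤ n ∧ ¬ PySem.Set.contains st.2 num then
    if (a.count num : Int) > num then
      (st.1 + ((a.count num : Int) - num), PySem.Set.add st.2 num)
    else if (a.count num : Int) ≠ num then
      (st.1 + 1, st.2)
    else st
  else st

def pvContrib (n : Int) (a l : List Int) (v : Int) : Int :=
  if v ≤ n then
    if (a.count v : Int) > v then (a.count v : Int) - v
    else if (a.count v : Int) ≠ v then (l.count v : Int)
    else 0
  else 0

lemma pvContrib_ne (n : Int) (a l : List Int) {x v : Int} (h : v ≠ x) :
    pvContrib n a (x :: l) v = pvContrib n a l v := by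
  simp [pvContrib, Ne.symm h]

lemma toFinset_add (p : PySem.Set Int) (x : Int) :
    (PySem.Set.add p x).toFinset = insert x p.toFinset := by
  apply Finset.ext; intro y
  simp [List.mem_toFinset, PySem.Set.mem_add]; tauto

lemma contains_iff (p : PySem.Set Int) (x : Int) :
    PySem.Set.contains p x = true ↔ x ∈ p := by
  simp [PySem.Set.contains]

lemma pvA_loop (n : Int) (a : List Int) (l : List Int) : ∀ (t : Int) (p : PySem.Set Int),
    (l.foldl (pvStepA n a) (t, p)).1
    = t + ∑ v ∈ l.toFinset \ p.toFinset, pvContrib n a l v := by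
  induction l with
  | nil => intro t p; simp
  | cons x l' ih =>
    intro t p
    rw [List.foldl_cons, List.toFinset_cons]
    by_cases hp : x ∈ p
    · have hc : PySem.Set.contains p x = true := (contains_iff p x).mpr hp
      have hpF : x ∈ p.toFinset := List.mem_toFinset.mpr hp
      have hstep : pvStepA n a (t, p) x = (t, p) := by simp [pvStepA, hp]
      rw [hstep, ih, Finset.insert_sdiff_of_mem _ hpF]
      congr 1
      apply Finset.sum_congr rfl
      intro v hv
      refine (pvContrib_ne n a l' ?_).symm
      intro hvx
      exact (Finset.mem_sdiff.mp hv).2 (hvx ▸ hpF)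
    · have hc : ¬ PySem.Set.contains p x = true := fun h => hp ((contains_iff p x).mp h)
      have hpF : x ∉ p.toFinset := fun h => hp (List.mem_toFinset.mp h)
      have hins : insert x l'.toFinset \ p.toFinset = insert x (l'.toFinset \ p.toFinset) := by
        apply Finset.ext; intro y
        simp only [Finset.mem_sdiff, Finset.mem_insert]
        by_cases hyx : y = x
        · subst hyx; simp [hpF]
        · tauto
      set T := l'.toFinset \ p.toFinset with hT
      have hsum_ins : ∀ f : Int → Int, ∑ v ∈ insert x T, f v = f x + ∑ v ∈ T.erase x, f v := by
        intro f
        by_cases hxT : x ∈ T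
        · rw [Finset.insert_eq_self.mpr hxT, ← Finset.add_sum_erase T f hxT]
        · rw [Finset.sum_insert hxT, Finset.erase_eq_self.mpr hxT]
      have hcongr_erase : ∑ v ∈ T.erase x, pvContrib n a (x :: l') v
          = ∑ v ∈ T.erase x, pvContrib n a l' v := by
        apply Finset.sum_congr rfl
        intro v hv
        exact pvContrib_ne n a l' (Finset.ne_of_mem_erase hv)
      by_cases hxn : x ≤ n
      · by_cases hgt : (a.count x : Int) > x
        · have hstep : pvStepA n a (t, p) x
              = (t + ((a.count x : Int) - x), PySem.Set.add p x) := by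
            simp [pvStepA, hxn, hp, hgt]
          rw [hstep, ih, toFinset_add, Finset.sdiff_insert, ← hT, hins, hsum_ins, hcongr_erase]
          have hcx : pvContrib n a (x :: l') x = (a.count x : Int) - x := by
            simp [pvContrib, hxn, hgt]
          rw [hcx]; ring
        · by_cases hne : (a.count x : Int) ≠ x
          · have hstep : pvStepA n a (t, p) x = (t + 1, p) := by
              simp [pvStepA, hxn, hp, hgt, hne]
            rw [hstep, ih, ← hT, hins, hsum_ins, hcongr_erase]
            have hcx : pvContrib n a (x :: l') x = (l'.count x : Int) + 1 := by
              simp [pvContrib, hxn, hgt, hne, List.count_cons_self]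
            rw [hcx]
            by_cases hxT : x ∈ T
            · rw [← Finset.add_sum_erase T _ hxT]
              have : pvContrib n a l' x = (l'.count x : Int) := by
                simp [pvContrib, hxn, hgt, hne]
              rw [this]; ring
            · rw [Finset.erase_eq_self.mpr hxT]
              have hx0 : x ∉ l' := by
                intro h
                exact hxT (by rw [hT]; exact Finset.mem_sdiff.mpr ⟨List.mem_toFinset.mpr h, hpF⟩)
              rw [List.count_eq_zero_of_not_mem hx0]
              ring
          · have heq : (a.count x : Int) = x := by omega
            have hstep : pvStepA n a (t, p) x = (t, p) := by
              simp [pvStepA, hxn, hp, heq]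
            rw [hstep, ih, ← hT, hins, hsum_ins, hcongr_erase]
            have hcx : pvContrib n a (x :: l') x = 0 := by simp [pvContrib, hxn, heq]
            rw [hcx, Finset.sum_erase]
            · ring
            · simp [pvContrib, hxn, heq]
      · have hstep : pvStepA n a (t, p) x = (t, p) := by simp [pvStepA, hxn]
        rw [hstep, ih, ← hT, hins, hsum_ins, hcongr_erase]
        have hcx : pvContrib n a (x :: l') x = 0 := by simp [pvContrib, hxn]
        rw [hcx, Finset.sum_erase]
        · ring
        · simp [pvContrib, hxn]

lemma pv_main (n : Int) (a : List Int) : removedElement n a = removedElement_alt n a := by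
  have hA : removedElement n a = ∑ v ∈ a.toFinset, pvContrib n a a v := by
    have : removedElement n a = (a.foldl (pvStepA n a) ((0 : Int), PySem.Set.empty)).1 := rfl
    rw [this, pvA_loop n a a 0 PySem.Set.empty]
    simp [PySem.Set.empty]
  have hB : removedElement_alt n a
      = ((PySem.Set.ofList a).map (fun k => pvContrib n a a k)).sum := by
    unfold removedElement_alt
    simp only [PySem.Dict.foldl_insert_getD_add_one_eq_counter, PySem.Dict.items_counter]
    rw [PySem.List.foldl_congr_mem _ _
      (fun (total : Int) vc => total + pvContrib n a a vc.1) 0 ?_]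
    · rw [PySem.List.foldl_add]
      simp only [List.map_map, zero_add]
      rfl
    · intro acc vc hvc
      simp only [List.mem_map] at hvc
      obtain ⟨k, hk, rfl⟩ := hvc
      simp only [pvContrib]
      split_ifs <;> push_cast <;> omega
  rw [hA, hB, ← List.sum_toFinset _ (PySem.Set.nodup_ofList a)]
  congr 1
  apply Finset.ext; intro y
  simp [List.mem_toFinset, PySem.Set.mem_ofList]

-- ===== VERDICT (by name: the statement is the Claim_ definition above) =====
theorem removedElement_spec : Claim_equal_removedElement := by
  intro n a _
  unfold Spec_removedElement
  exact pv_main n a
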